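-- pv_equiv track=rewrite | github.com/Infinity42o/L-Algoritmusok-s-adatszerkezetek | kollokvium/main.py | mixtures_smoke
-- ===== SOURCE A (Python) =====
-- def mixtures_smoke(colors):
--     n = len(colors)  # A keverékek száma
--     # dp[i][j] tárolja a minimális füst mennyiségét, ami az i-től j-ig terjedő keverékek összekeveréséből keletkezik
--     dp = [[0] * n for _ in range(n)]
--     # sum_mod[i][j] tárolja az i-től j-ig terjedő keverékek eredményül kapott színét mod 100 alapján
--     sum_mod = [[0] * n for _ in range(n)]
--
--     # sum_mod inicializálása, egy keverékre vonatkozóan (önmagával keverve)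
--     for i in range(n):
--         sum_mod[i][i] = colors[i]
--
--     # A dp és sum_mod feltöltése minden lehetséges keverék kombinációra
--     for length in range(2, n+1):  # A subprobléma hossza
--         for i in range(n - length + 1):
--             j = i + length - 1
--             dp[i][j] = float('inf')  # Kezdetben nagyon nagy értékre állítjuk
--
--             # Végigmegyünk az i és j közötti összes lehetséges bontási ponton
--             for k in range(i, j):
--                 # Kiszámítjuk a füst mennyiségét, ha az i-től k-ig és a k+1-től j-ig terjedő részeket keverjük
--                 smoke = dp[i][k] + dp[k+1][j] + sum_mod[i][k] * sum_mod[k+1][j]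
--                 if smoke < dp[i][j]:  # Ha az aktuális füst kevesebb, mint az eddigi minimum
--                     dp[i][j] = smoke  # Frissítjük a minimális füst értéket
--                     # Frissítjük a keverékek színét (mod 100)
--                     sum_mod[i][j] = (sum_mod[i][k] + sum_mod[k+1][j]) % 100
--
--     # Visszatérünk a minimális füst mennyiségével az első és az utolsó keverék között
--     return dp[0][n-1]
-- ===== SOURCE B (Python) =====
-- def mixtures_smoke(colors):
--     # Top-down memoized recursion with prefix sums (A builds bottom-up dp + sum_mod tables).
--     n = len(colors)
--     prefix = [0] * (n + 1)
--     for i in range(n):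
--         prefix[i + 1] = prefix[i] + colors[i]
--
--     def color(i, j):
--         # single elements keep their raw color; merged ranges are reduced mod 100
--         return colors[i] if i == j else (prefix[j + 1] - prefix[i]) % 100
--
--     memo = {}
--
--     def solve(i, j):
--         if i == j:
--             return 0
--         if (i, j) in memo:
--             return memo[(i, j)]
--         cands = []
--         for k in range(i, j):
--             cands.append(solve(i, k) + solve(k + 1, j) + color(i, k) * color(k + 1, j))
--         best = min(cands)
--         memo[(i, j)] = best
--         return best
--
--     return solve(0, n - 1)
-- ===== Notes on version B (the rewrite author's own statement) =====
-- stated objective: alternative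
-- what changed: Replaces the bottom-up triple-loop filling dp and sum_mod tables by a top-down memoized recursion whose interval colors come directly from a precomputed prefix-sum array instead of being stored and updated alongside dp.
import Mathlib
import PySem

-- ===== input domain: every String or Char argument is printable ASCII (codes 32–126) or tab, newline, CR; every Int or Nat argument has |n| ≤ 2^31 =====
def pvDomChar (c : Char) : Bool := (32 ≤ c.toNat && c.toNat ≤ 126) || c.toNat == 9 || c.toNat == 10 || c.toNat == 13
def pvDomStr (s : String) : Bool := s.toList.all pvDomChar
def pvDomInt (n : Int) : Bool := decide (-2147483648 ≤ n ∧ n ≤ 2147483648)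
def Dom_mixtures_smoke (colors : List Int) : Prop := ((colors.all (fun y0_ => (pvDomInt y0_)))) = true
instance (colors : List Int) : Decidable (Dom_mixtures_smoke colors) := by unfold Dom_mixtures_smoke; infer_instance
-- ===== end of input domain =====

-- B changes the decomposition: a top-down memoized recursion with a prefix-sum array, instead of
-- A's bottom-up triple loop filling dp and sum_mod tables (objective: alternative, same O(n^3)).

-- ===== PORT A =====
-- 2D-table helpers: m[i][j] read / write (every index A uses is in range, so getD/set is exact)
def pvGet2 (m : List (List Int)) (i j : Nat) : Int := (m.getD i []).getD j 0
def pvSet2 (m : List (List Int)) (i j : Nat) (v : Int) : List (List Int) :=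
  m.set i ((m.getD i []).set j v)

-- the inner `for k in range(i, j)` loop: dp[i][j] = float('inf') is modeled as the `none` start;
-- the pair carries (dp[i][j], sum_mod[i][j]) exactly as Python updates them
def pvInner (st : List (List Int) × List (List Int)) (i j : Nat) : Option Int × Int :=
  (List.range' i (j - i)).foldl (fun acc k =>
      let smoke := pvGet2 st.1 i k + pvGet2 st.1 (k+1) j + pvGet2 st.2 i k * pvGet2 st.2 (k+1) j
      match acc.1 with
      | none => (some smoke, PySem.Int.mod (pvGet2 st.2 i k + pvGet2 st.2 (k+1) j) 100)
      | some b => if smoke < b then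
          (some smoke, PySem.Int.mod (pvGet2 st.2 i k + pvGet2 st.2 (k+1) j) 100)
        else acc)
    (none, pvGet2 st.2 i j)

-- body of the `for i in range(n - length + 1)` loop
def pvCellStep (st : List (List Int) × List (List Int)) (i j : Nat) :
    List (List Int) × List (List Int) :=
  let r := pvInner st i j
  (pvSet2 st.1 i j (r.1.getD 0), pvSet2 st.2 i j r.2)

-- one pass of the `for length in range(2, n+1)` loop
def pvPass (n len : Nat) (st : List (List Int) × List (List Int)) :
    List (List Int) × List (List Int) :=
  (List.range (n - len + 1)).foldl (fun st i => pvCellStep st i (i + len - 1)) st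

def mixtures_smoke (colors : List Int) : Int :=
  let n := colors.length
  let dp : List (List Int) := List.replicate n (List.replicate n 0)
  let sm0 : List (List Int) := List.replicate n (List.replicate n 0)
  let sm := (List.range n).foldl (fun s i => pvSet2 s i i (colors.getD i 0)) sm0
  let st := (List.range' 2 (n + 1 - 2)).foldl (fun st len => pvPass n len st) (dp, sm)
  pvGet2 st.1 0 (n - 1)

-- ===== PORT B =====
-- prefix[i+1] = prefix[i] + colors[i]
def pvPrefix (colors : List Int) : List Int :=
  (List.range colors.length).foldl
    (fun p i => p.set (i+1) (p.getD i 0 + colors.getD i 0))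
    (List.replicate (colors.length + 1) 0)

-- color(i, j): single elements keep their raw color, merged ranges are reduced mod 100
def pvColor (colors pre : List Int) (i j : Nat) : Int :=
  if i = j then colors.getD i 0
  else PySem.Int.mod (pre.getD (j+1) 0 - pre.getD i 0) 100

-- solve(i, j) threading the memo dict; the Nat `fuel` argument (≥ recursion depth, c.length at
-- the top call) only makes the recursion structural and is never exhausted on admitted inputs
def pvSolve (colors pre : List Int) : Nat → Nat → Nat → PySem.Dict (Nat × Nat) Int →
    Int × PySem.Dict (Nat × Nat) Int
  | 0, _, _, memo => (0, memo)
  | fuel+1, i, j, memo =>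
    if i = j then (0, memo)
    else
      match memo.get? (i, j) with
      | some v => (v, memo)
      | none =>
        -- `for k in range(i, j): cands.append(...)`
        let r := (List.range' i (j - i)).foldl
          (fun (acc : List Int × PySem.Dict (Nat × Nat) Int) k =>
            let a := pvSolve colors pre fuel i k acc.2
            let b := pvSolve colors pre fuel (k+1) j a.2
            (acc.1 ++ [a.1 + b.1 + pvColor colors pre i k * pvColor colors pre (k+1) j], b.2))
          ([], memo)
        let best := (r.1.min?).getD 0     -- min(cands)
        (best, r.2.insert (i, j) best)

def mixtures_smoke_alt (colors : List Int) : Int :=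
  let n := colors.length
  let pre := pvPrefix colors
  (pvSolve colors pre n 0 (n - 1) PySem.Dict.empty).1

-- ===== PRECONDITION & SPEC =====
-- Pre_ excludes only the empty list, on which A raises IndexError (dp[0][-1] of an empty table).
def Pre_mixtures_smoke (colors : List Int) : Prop := colors ≠ []
instance (colors : List Int) : Decidable (Pre_mixtures_smoke colors) := by
  unfold Pre_mixtures_smoke; infer_instance

def pvWitness_mixtures_smoke : List Int := [40, 60, 20]

def Spec_mixtures_smoke (colors : List Int) (out : Int) : Prop := out = mixtures_smoke_alt colors
instance (colors : List Int) (out : Int) : Decidable (Spec_mixtures_smoke colors out) := by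
  unfold Spec_mixtures_smoke; infer_instance

-- ===== CLAIM (what is proved, stated in full; the proofs are below) =====
def Claim_equal_mixtures_smoke : Prop := ∀ (colors : List Int), Dom_mixtures_smoke colors →
  Pre_mixtures_smoke colors → Spec_mixtures_smoke colors (mixtures_smoke colors)

-- ===== LEMMAS AND PROOFS =====

-- reference interval-DP value, by fuel recursion (fuel ≥ j - i suffices)
def pvSum (c : List Int) (t : Nat) : Int := (c.take t).sum

def pvColorS (c : List Int) (i j : Nat) : Int :=
  if i = j then c.getD i 0 else PySem.Int.mod (pvSum c (j+1) - pvSum c i) 100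

def pvSolveF (c : List Int) : Nat → Nat → Nat → Int
  | 0, _, _ => 0
  | fuel+1, i, j =>
    if i < j then
      (((List.range' i (j - i)).map (fun k =>
          pvSolveF c fuel i k + pvSolveF c fuel (k+1) j +
            pvColorS c i k * pvColorS c (k+1) j)).min?).getD 0
    else 0

def pvSolveP (c : List Int) (i j : Nat) : Int := pvSolveF c (j - i) i j

theorem pvSolveF_mono (c : List Int) : ∀ f1 f2 i j, j - i ≤ f1 → j - i ≤ f2 →
    pvSolveF c f1 i j = pvSolveF c f2 i j := by
  intro f1
  induction f1 with
  | zero =>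
    intro f2 i j h1 h2
    have hij : ¬ i < j := by omega
    cases f2 <;> simp [pvSolveF, hij]
  | succ f1 ih =>
    intro f2 i j h1 h2
    by_cases hij : i < j
    · have hf2 : f2 ≠ 0 := by omega
      obtain ⟨f2', rfl⟩ := Nat.exists_eq_succ_of_ne_zero hf2
      simp only [pvSolveF, hij, if_true]
      congr 2
      apply List.map_congr_left
      intro k hk
      have hk' := List.mem_range'_1.mp hk
      have hki : i ≤ k ∧ k < j := by omega
      rw [ih f2' i k (by omega) (by omega), ih f2' (k+1) j (by omega) (by omega)]
    · cases f2 <;> simp [pvSolveF, hij]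

theorem pvSolveP_lt (c : List Int) (i j : Nat) (h : i < j) :
    pvSolveP c i j = (((List.range' i (j - i)).map (fun k =>
      pvSolveP c i k + pvSolveP c (k+1) j +
        pvColorS c i k * pvColorS c (k+1) j)).min?).getD 0 := by
  obtain ⟨d, hd⟩ : ∃ d, j - i = d + 1 := ⟨j - i - 1, by omega⟩
  unfold pvSolveP
  rw [hd]
  simp only [pvSolveF, h, if_true]
  rw [← hd]
  congr 2
  apply List.map_congr_left
  intro k hk
  have hk' := List.mem_range'_1.mp hk
  rw [pvSolveF_mono c d (k - i) i k (by omega) (by omega),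
      pvSolveF_mono c d (j - (k+1)) (k+1) j (by omega) (by omega)]

theorem pvSolveP_self (c : List Int) (i : Nat) : pvSolveP c i i = 0 := by
  simp [pvSolveP, pvSolveF]

-- elementary getD/set facts specialised to default 0
theorem pvGetD_set_self (l : List Int) (i : Nat) (v : Int) (h : i < l.length) :
    (l.set i v).getD i 0 = v := by
  simp [List.getD, h]

theorem pvGetD_set_ne (l : List Int) (i j : Nat) (v : Int) (h : i ≠ j) :
    (l.set i v).getD j 0 = l.getD j 0 := by
  simp [List.getD, List.getElem?_set_ne h]

theorem pvGetD_replicate (i n : Nat) : (List.replicate n (0:Int)).getD i 0 = 0 := by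
  rcases Nat.lt_or_ge i n with h | h
  · simp [List.getD, h]
  · rw [List.getD, List.getElem?_eq_none_iff.2 (by simpa using h)]; rfl

theorem pvSum_succ (c : List Int) (t : Nat) (h : t < c.length) :
    pvSum c (t+1) = pvSum c t + c.getD t 0 := by
  unfold pvSum
  rw [List.sum_take_succ c t h]
  congr 1
  simp [List.getD, List.getElem?_eq_getElem h]

-- the two sum_mod update rules agree: merging any split of [i,j] gives the range sum mod 100
theorem pvColorS_combine (c : List Int) (i k j : Nat)
    (h1 : i ≤ k) (h2 : k < j) (h3 : j < c.length) :
    PySem.Int.mod (pvColorS c i k + pvColorS c (k+1) j) 100 = pvColorS c i j := by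
  have hm : ∀ a : Int, PySem.Int.mod a 100 = a % 100 := fun a =>
    PySem.Int.mod_eq_emod_of_pos (by norm_num)
  have hx : pvColorS c i k % 100 = (pvSum c (k+1) - pvSum c i) % 100 := by
    by_cases hik : i = k
    · subst hik
      unfold pvColorS
      rw [if_pos rfl, pvSum_succ c i (by omega)]
      congr 1; ring
    · unfold pvColorS
      rw [if_neg hik, hm, Int.emod_emod_of_dvd _ dvd_rfl]
  have hy : pvColorS c (k+1) j % 100 = (pvSum c (j+1) - pvSum c (k+1)) % 100 := by
    by_cases hkj : k + 1 = j
    · subst hkj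
      unfold pvColorS
      rw [if_pos rfl, pvSum_succ c (k+1) (by omega)]
      congr 1; ring
    · unfold pvColorS
      rw [if_neg hkj, hm, Int.emod_emod_of_dvd _ dvd_rfl]
  have hij : ¬ i = j := by omega
  rw [hm, Int.add_emod, hx, hy, ← Int.add_emod,
    show pvSum c (k+1) - pvSum c i + (pvSum c (j+1) - pvSum c (k+1)) = pvSum c (j+1) - pvSum c i by ring]
  unfold pvColorS
  rw [if_neg hij, hm]

-- Python's running-min-with-side-value loop, starting from an already-seen candidate
theorem pvFoldMin_aux (f g : Nat → Int) (tgt : Int) :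
    ∀ (ks : List Nat) (b : Int), (∀ k ∈ ks, g k = tgt) →
    ks.foldl (fun (acc : Option Int × Int) k =>
        match acc.1 with
        | none => (some (f k), g k)
        | some b' => if f k < b' then (some (f k), g k) else acc) (some b, tgt)
      = (some (List.foldl min b (ks.map f)), tgt) := by
  intro ks
  induction ks with
  | nil => intro b _; rfl
  | cons k rest ih =>
    intro b h
    have hk : g k = tgt := h k (List.mem_cons_self ..)
    have hrest : ∀ x ∈ rest, g x = tgt := fun x hx => h x (List.mem_cons_of_mem _ hx)
    simp only [List.foldl_cons, List.map_cons]
    by_cases hlt : f k < b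
    · rw [show min b (f k) = f k by omega, if_pos hlt, hk, ih (f k) hrest]
    · rw [show min b (f k) = b by omega, if_neg hlt, ih b hrest]

-- the full inner loop starting from `inf` (= none): first min of the candidates, color written = tgt
theorem pvFoldMin (f g : Nat → Int) (tgt s : Int) (k0 : Nat) (ks : List Nat)
    (h : ∀ k ∈ k0 :: ks, g k = tgt) :
    (k0 :: ks).foldl (fun (acc : Option Int × Int) k =>
        match acc.1 with
        | none => (some (f k), g k)
        | some b' => if f k < b' then (some (f k), g k) else acc) (none, s)
      = (some ((((k0 :: ks).map f).min?).getD 0), tgt) := by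
  have hk0 : g k0 = tgt := h k0 (List.mem_cons_self ..)
  simp only [List.foldl_cons]
  rw [hk0, pvFoldMin_aux f g tgt ks (f k0) (fun x hx => h x (List.mem_cons_of_mem _ hx))]
  simp [List.min?]

-- ===== A-side: table shapes and the loop invariant =====
def pvShape (n : Nat) (m : List (List Int)) : Prop :=
  m.length = n ∧ ∀ r ∈ m, r.length = n

theorem pvShape_set2 {n : Nat} {m : List (List Int)} (h : pvShape n m) (i j : Nat) (v : Int)
    (hi : i < n) : pvShape n (pvSet2 m i j v) := by
  obtain ⟨hl, hr⟩ := h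
  constructor
  · simp [pvSet2, hl]
  · intro r hmem
    rcases List.mem_or_eq_of_mem_set hmem with h' | h'
    · exact hr r h'
    · subst h'
      have hrow : m.getD i [] = m[i]'(by omega) := by
        simp [List.getD, List.getElem?_eq_getElem (by omega : i < m.length)]
      rw [List.length_set, hrow]
      exact hr _ (List.getElem_mem _)

theorem pvGet2_set2_self {n : Nat} {m : List (List Int)} (h : pvShape n m) (i j : Nat) (v : Int)
    (hi : i < n) (hj : j < n) : pvGet2 (pvSet2 m i j v) i j = v := by
  obtain ⟨hl, hr⟩ := h
  have hrow : m.getD i [] = m[i]'(by omega) := by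
    simp [List.getD, List.getElem?_eq_getElem (by omega : i < m.length)]
  have hrl : (m.getD i []).length = n := by rw [hrow]; exact hr _ (List.getElem_mem _)
  unfold pvGet2 pvSet2
  rw [show (m.set i ((m.getD i []).set j v)).getD i [] = (m.getD i []).set j v by
    simp [List.getD, hl, hi]]
  exact pvGetD_set_self _ _ _ (by omega)

theorem pvGet2_set2_ne {n : Nat} {m : List (List Int)} (h : pvShape n m) (a b i j : Nat) (v : Int)
    (ha : a < n) (hne : i ≠ a ∨ j ≠ b) : pvGet2 (pvSet2 m a b v) i j = pvGet2 m i j := by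
  unfold pvGet2 pvSet2
  by_cases hia : i = a
  · subst hia
    have hb : j ≠ b := by tauto
    rw [show (m.set i ((m.getD i []).set b v)).getD i [] = (m.getD i []).set b v by
      simp [List.getD, h.1, ha]]
    exact pvGetD_set_ne _ _ _ _ (by omega)
  · rw [show (m.set a ((m.getD a []).set b v)).getD i [] = m.getD i [] by
      simp [List.getD, List.getElem?_set_ne (by omega : a ≠ i)]]

def pvInv (c : List Int) (L : Nat) (st : List (List Int) × List (List Int)) : Prop :=
  pvShape c.length st.1 ∧ pvShape c.length st.2 ∧
  ∀ i j, i ≤ j → j < c.length → j - i ≤ L →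
    pvGet2 st.1 i j = pvSolveP c i j ∧ pvGet2 st.2 i j = pvColorS c i j

theorem pvGet2_replicate (n i j : Nat) :
    pvGet2 (List.replicate n (List.replicate n (0:Int))) i j = 0 := by
  unfold pvGet2
  rcases Nat.lt_or_ge i n with h | h
  · rw [show (List.replicate n (List.replicate n (0:Int))).getD i [] = List.replicate n 0 by
      simp [List.getD, h]]
    exact pvGetD_replicate j n
  · have h' : (List.replicate n (List.replicate n (0:Int))).getD i [] = [] := by
      rw [List.getD, List.getElem?_eq_none_iff.2 (by simpa using h)]; rfl
    rw [h']; rfl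

theorem pvShape_replicate (n : Nat) :
    pvShape n (List.replicate n (List.replicate n (0:Int))) := by
  constructor
  · simp
  · intro r hr
    rw [List.eq_of_mem_replicate hr]
    simp

theorem pvSmInit (c : List Int) : ∀ m, m ≤ c.length →
    pvShape c.length ((List.range m).foldl (fun s i => pvSet2 s i i (c.getD i 0))
      (List.replicate c.length (List.replicate c.length 0))) ∧
    ∀ i j, pvGet2 ((List.range m).foldl (fun s i => pvSet2 s i i (c.getD i 0))
      (List.replicate c.length (List.replicate c.length 0))) i j
      = if i = j ∧ i < m then c.getD i 0 else 0 := by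
  intro m
  induction m with
  | zero =>
    intro _
    refine ⟨pvShape_replicate _, fun i j => ?_⟩
    rw [if_neg (by omega)]
    exact pvGet2_replicate _ _ _
  | succ m ih =>
    intro hm
    obtain ⟨ihs, ihv⟩ := ih (by omega)
    rw [List.range_succ, List.foldl_append, List.foldl_cons, List.foldl_nil]
    refine ⟨pvShape_set2 ihs m m _ (by omega), fun i j => ?_⟩
    by_cases hd : i = m ∧ j = m
    · obtain ⟨rfl, rfl⟩ := hd
      rw [pvGet2_set2_self ihs _ _ _ (by omega) (by omega), if_pos (by omega)]
    · have hne : i ≠ m ∨ j ≠ m := by tauto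
      rw [pvGet2_set2_ne ihs m m i j _ (by omega) hne, ihv i j]
      split_ifs with h1 h2 <;> first | rfl | omega

theorem pvInit (c : List Int) :
    pvInv c 0 (List.replicate c.length (List.replicate c.length 0),
      (List.range c.length).foldl (fun s i => pvSet2 s i i (c.getD i 0))
        (List.replicate c.length (List.replicate c.length 0))) := by
  obtain ⟨hs, hv⟩ := pvSmInit c c.length (le_refl _)
  refine ⟨pvShape_replicate _, hs, fun i j hij hj hL => ?_⟩
  have hij' : i = j := by omega
  subst hij'
  constructor
  · rw [pvGet2_replicate, pvSolveP_self]
  · rw [hv i i, if_pos (by omega)]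
    unfold pvColorS
    rw [if_pos rfl]

theorem pvPass_inv (c : List Int) (L : Nat) (hL1 : 1 ≤ L) (hLn : L + 1 ≤ c.length)
    (st : List (List Int) × List (List Int)) (h : pvInv c (L-1) st) :
    pvInv c L (pvPass c.length (L+1) st) := by
  have aux : ∀ m, m ≤ c.length - L →
      pvShape c.length ((List.range m).foldl (fun st i => pvCellStep st i (i + (L+1) - 1)) st).1 ∧
      pvShape c.length ((List.range m).foldl (fun st i => pvCellStep st i (i + (L+1) - 1)) st).2 ∧
      ∀ i j, i ≤ j → j < c.length → (j - i ≤ L - 1 ∨ (j - i = L ∧ i < m)) →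
        pvGet2 ((List.range m).foldl (fun st i => pvCellStep st i (i + (L+1) - 1)) st).1 i j
          = pvSolveP c i j ∧
        pvGet2 ((List.range m).foldl (fun st i => pvCellStep st i (i + (L+1) - 1)) st).2 i j
          = pvColorS c i j := by
    intro m
    induction m with
    | zero =>
      intro _
      exact ⟨h.1, h.2.1, fun i j hij hj hc => h.2.2 i j hij hj (by omega)⟩
    | succ m ih =>
      intro hm
      obtain ⟨ih1, ih2, ihv⟩ := ih (by omega)
      rw [List.range_succ, List.foldl_append, List.foldl_cons, List.foldl_nil]
      set st' := (List.range m).foldl (fun st i => pvCellStep st i (i + (L+1) - 1)) st with hst'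
      have hj0 : m + (L+1) - 1 = m + L := by omega
      rw [hj0]
      have hj0n : m + L < c.length := by omega
      obtain ⟨d, hdL⟩ : ∃ d, L = d + 1 := ⟨L - 1, by omega⟩
      -- candidate and color functions read from st'
      have hrange : List.range' m ((m + L) - m) = m :: List.range' (m+1) d := by
        rw [show (m + L) - m = d + 1 by omega, List.range'_succ]
      have hmemb : ∀ k ∈ m :: List.range' (m+1) d, m ≤ k ∧ k < m + L := by
        intro k hk
        rcases List.mem_cons.mp hk with rfl | hk'
        · omega
        · have := List.mem_range'_1.mp hk'
          omega
      have hsmall : ∀ k, m ≤ k → k < m + L →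
          (pvGet2 st'.1 m k = pvSolveP c m k ∧ pvGet2 st'.2 m k = pvColorS c m k) ∧
          (pvGet2 st'.1 (k+1) (m+L) = pvSolveP c (k+1) (m+L) ∧
           pvGet2 st'.2 (k+1) (m+L) = pvColorS c (k+1) (m+L)) := by
        intro k h1 h2
        exact ⟨ihv m k (by omega) (by omega) (by omega),
               ihv (k+1) (m+L) (by omega) (by omega) (by omega)⟩
      have hG : ∀ k ∈ m :: List.range' (m+1) d,
          PySem.Int.mod (pvGet2 st'.2 m k + pvGet2 st'.2 (k+1) (m+L)) 100
            = pvColorS c m (m+L) := by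
        intro k hk
        obtain ⟨h1, h2⟩ := hmemb k hk
        obtain ⟨⟨_, e1⟩, ⟨_, e2⟩⟩ := hsmall k h1 h2
        rw [e1, e2]
        exact pvColorS_combine c m k (m+L) h1 h2 hj0n
      have hinner : pvInner st' m (m+L)
          = (some ((((m :: List.range' (m+1) d).map (fun k =>
                pvGet2 st'.1 m k + pvGet2 st'.1 (k+1) (m+L) +
                  pvGet2 st'.2 m k * pvGet2 st'.2 (k+1) (m+L))).min?).getD 0),
             pvColorS c m (m+L)) := by
        unfold pvInner
        rw [hrange]
        exact pvFoldMin _ _ _ _ _ _ hG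
      have hminval : (((m :: List.range' (m+1) d).map (fun k =>
            pvGet2 st'.1 m k + pvGet2 st'.1 (k+1) (m+L) +
              pvGet2 st'.2 m k * pvGet2 st'.2 (k+1) (m+L))).min?).getD 0
          = pvSolveP c m (m+L) := by
        rw [pvSolveP_lt c m (m+L) (by omega), hrange]
        congr 2
        apply List.map_congr_left
        intro k hk
        obtain ⟨h1, h2⟩ := hmemb k hk
        obtain ⟨⟨e1, e2⟩, ⟨e3, e4⟩⟩ := hsmall k h1 h2
        rw [e1, e2, e3, e4]
      have hcell : pvCellStep st' m (m+L)
          = (pvSet2 st'.1 m (m+L) (pvSolveP c m (m+L)),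
             pvSet2 st'.2 m (m+L) (pvColorS c m (m+L))) := by
        unfold pvCellStep
        rw [hinner, hminval]
        rfl
      rw [hcell]
      refine ⟨pvShape_set2 ih1 m (m+L) _ (by omega),
              pvShape_set2 ih2 m (m+L) _ (by omega), fun i j hij hj hc => ?_⟩
      by_cases hd' : i = m ∧ j = m + L
      · obtain ⟨rfl, rfl⟩ := hd'
        exact ⟨pvGet2_set2_self ih1 _ _ _ (by omega) (by omega),
               pvGet2_set2_self ih2 _ _ _ (by omega) (by omega)⟩
      · have hne : i ≠ m ∨ j ≠ m + L := by tauto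
        rw [pvGet2_set2_ne ih1 m (m+L) i j _ (by omega) hne,
            pvGet2_set2_ne ih2 m (m+L) i j _ (by omega) hne]
        refine ihv i j hij hj ?_
        rcases hc with hc | ⟨hc1, hc2⟩
        · exact Or.inl hc
        · by_cases him : i = m
          · exfalso; omega
          · exact Or.inr ⟨hc1, by omega⟩
  have hfin := aux (c.length - L) (le_refl _)
  have hrw : c.length - (L+1) + 1 = c.length - L := by omega
  unfold pvPass
  rw [hrw]
  exact ⟨hfin.1, hfin.2.1, fun i j hij hj hL' => hfin.2.2 i j hij hj (by omega)⟩

theorem pvOuter (c : List Int) : ∀ M, M ≤ c.length - 1 →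
    pvInv c M ((List.range' 2 M).foldl (fun st len => pvPass c.length len st)
      (List.replicate c.length (List.replicate c.length 0),
       (List.range c.length).foldl (fun s i => pvSet2 s i i (c.getD i 0))
         (List.replicate c.length (List.replicate c.length 0)))) := by
  intro M
  induction M with
  | zero => intro _; exact pvInit c
  | succ M ih =>
    intro hM
    rw [List.range'_1_concat, List.foldl_append, List.foldl_cons, List.foldl_nil]
    rw [show 2 + M = (M + 1) + 1 by omega]
    exact pvPass_inv c (M+1) (by omega) (by omega) _ (by
      simpa using ih (by omega))

theorem pvA (c : List Int) (h : c ≠ []) : mixtures_smoke c = pvSolveP c 0 (c.length - 1) := by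
  have hn : 1 ≤ c.length := List.length_pos_of_ne_nil h
  show pvGet2 ((List.range' 2 (c.length + 1 - 2)).foldl (fun st len => pvPass c.length len st)
      (List.replicate c.length (List.replicate c.length 0),
       (List.range c.length).foldl (fun s i => pvSet2 s i i (c.getD i 0))
         (List.replicate c.length (List.replicate c.length 0)))).1 0 (c.length - 1)
    = pvSolveP c 0 (c.length - 1)
  rw [show c.length + 1 - 2 = c.length - 1 by omega]
  exact ((pvOuter c (c.length - 1) (le_refl _)).2.2 0 (c.length - 1)
    (by omega) (by omega) (by omega)).1

-- ===== B-side: prefix sums and the memo invariant =====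
theorem pvPrefix_spec (c : List Int) : ∀ t, t ≤ c.length → (pvPrefix c).getD t 0 = pvSum c t := by
  have aux : ∀ m, m ≤ c.length →
      ((List.range m).foldl (fun p i => p.set (i+1) (p.getD i 0 + c.getD i 0))
        (List.replicate (c.length + 1) 0)).length = c.length + 1 ∧
      ∀ t, t ≤ m → ((List.range m).foldl (fun p i => p.set (i+1) (p.getD i 0 + c.getD i 0))
        (List.replicate (c.length + 1) 0)).getD t 0 = pvSum c t := by
    intro m
    induction m with
    | zero =>
      intro _
      refine ⟨by simp, fun t ht => ?_⟩
      rw [List.range_zero, List.foldl_nil, show t = 0 by omega, pvGetD_replicate]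
      simp [pvSum]
    | succ m ih =>
      intro hm
      obtain ⟨ihl, ihv⟩ := ih (by omega)
      rw [List.range_succ, List.foldl_append, List.foldl_cons, List.foldl_nil]
      refine ⟨by simpa using ihl, fun t ht => ?_⟩
      by_cases htm : t = m + 1
      · subst htm
        rw [pvGetD_set_self _ _ _ (by omega), ihv m (by omega),
            pvSum_succ c m (by omega)]
      · rw [pvGetD_set_ne _ _ _ _ (by omega), ihv t (by omega)]
  intro t ht
  exact (aux c.length (le_refl _)).2 t ht

theorem pvColor_eq (c : List Int) (i j : Nat) (hij : i ≤ j) (hj : j < c.length) :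
    pvColor c (pvPrefix c) i j = pvColorS c i j := by
  unfold pvColor pvColorS
  by_cases he : i = j
  · rw [if_pos he, if_pos he]
  · rw [if_neg he, if_neg he,
        pvPrefix_spec c (j+1) (by omega), pvPrefix_spec c i (by omega)]

def pvGood (c : List Int) (m : PySem.Dict (Nat × Nat) Int) : Prop :=
  ∀ a b v, m.get? (a, b) = some v → v = pvSolveP c a b

theorem pvSolve_spec (c : List Int) : ∀ (fuel i j : Nat) (memo : PySem.Dict (Nat × Nat) Int),
    j - i ≤ fuel → i ≤ j → j < c.length → pvGood c memo →
    (pvSolve c (pvPrefix c) fuel i j memo).1 = pvSolveP c i j ∧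
    pvGood c (pvSolve c (pvPrefix c) fuel i j memo).2 := by
  intro fuel
  induction fuel with
  | zero =>
    intro i j memo hM hij hj hg
    have he : i = j := by omega
    subst he
    exact ⟨(pvSolveP_self c i).symm, hg⟩
  | succ fuel ih =>
    intro i j memo hM hij hj hg
    by_cases he : i = j
    · subst he
      rw [pvSolve, if_pos rfl]
      exact ⟨(pvSolveP_self c i).symm, hg⟩
    · have sub : ∀ (ks : List Nat), (∀ k ∈ ks, i ≤ k ∧ k < j) →
          ∀ (acc : List Int) (memo' : PySem.Dict (Nat × Nat) Int), pvGood c memo' →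
          (ks.foldl (fun (acc : List Int × PySem.Dict (Nat × Nat) Int) k =>
              let a := pvSolve c (pvPrefix c) fuel i k acc.2
              let b := pvSolve c (pvPrefix c) fuel (k+1) j a.2
              (acc.1 ++ [a.1 + b.1 + pvColor c (pvPrefix c) i k *
                pvColor c (pvPrefix c) (k+1) j], b.2)) (acc, memo')).1
            = acc ++ ks.map (fun k => pvSolveP c i k + pvSolveP c (k+1) j +
                pvColorS c i k * pvColorS c (k+1) j) ∧
          pvGood c (ks.foldl (fun (acc : List Int × PySem.Dict (Nat × Nat) Int) k =>
              let a := pvSolve c (pvPrefix c) fuel i k acc.2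
              let b := pvSolve c (pvPrefix c) fuel (k+1) j a.2
              (acc.1 ++ [a.1 + b.1 + pvColor c (pvPrefix c) i k *
                pvColor c (pvPrefix c) (k+1) j], b.2)) (acc, memo')).2 := by
        intro ks
        induction ks with
        | nil => intro _ acc memo' hg'; exact ⟨by simp, hg'⟩
        | cons k rest ihk =>
          intro hb acc memo' hg'
          obtain ⟨hik, hkj⟩ := hb k (List.mem_cons_self ..)
          have ha := ih i k memo' (by omega) (by omega) (by omega) hg'
          have hb2 := ih (k+1) j _ (by omega) (by omega) (by omega) ha.2
          have hrest := ihk (fun x hx => hb x (List.mem_cons_of_mem _ hx))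
            (acc ++ [pvSolveP c i k + pvSolveP c (k+1) j +
              pvColorS c i k * pvColorS c (k+1) j])
            (pvSolve c (pvPrefix c) fuel (k+1) j
              (pvSolve c (pvPrefix c) fuel i k memo').2).2 hb2.2
          rw [List.foldl_cons]
          simp only []
          rw [ha.1, hb2.1, pvColor_eq c i k (by omega) (by omega),
              pvColor_eq c (k+1) j (by omega) (by omega)]
          refine ⟨?_, hrest.2⟩
          rw [hrest.1]
          simp
      rw [pvSolve, if_neg he]
      split
      case _ v hmg => exact ⟨hg i j v hmg, hg⟩
      case _ hmg =>
        obtain ⟨hv1, hv2⟩ := sub (List.range' i (j - i))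
          (fun k hk => by have := List.mem_range'_1.mp hk; omega) [] memo hg
        simp only []
        rw [hv1, List.nil_append]
        have hbest : (((List.range' i (j - i)).map (fun k =>
              pvSolveP c i k + pvSolveP c (k+1) j +
                pvColorS c i k * pvColorS c (k+1) j)).min?).getD 0
            = pvSolveP c i j := (pvSolveP_lt c i j (by omega)).symm
        refine ⟨hbest, ?_⟩
        intro a b v hv
        rw [PySem.Dict.get?_insert] at hv
        by_cases hab : (a, b) = (i, j)
        · rw [if_pos hab] at hv
          obtain ⟨rfl, rfl⟩ := Prod.mk.injEq .. ▸ hab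
          cases hv
          exact hbest.symm ▸ rfl
        · rw [if_neg hab] at hv
          exact hv2 a b v hv

theorem pvB (c : List Int) (h : c ≠ []) :
    mixtures_smoke_alt c = pvSolveP c 0 (c.length - 1) := by
  have hn : 1 ≤ c.length := List.length_pos_of_ne_nil h
  show (pvSolve c (pvPrefix c) c.length 0 (c.length - 1) PySem.Dict.empty).1
    = pvSolveP c 0 (c.length - 1)
  exact (pvSolve_spec c c.length 0 (c.length - 1) PySem.Dict.empty (by omega) (by omega)
    (by omega) (fun a b v hv => by rw [PySem.Dict.get?_empty] at hv; cases hv)).1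

-- ===== VERDICT (by name: the statement is the Claim_ definition above) =====
theorem mixtures_smoke_spec : Claim_equal_mixtures_smoke := by
  intro colors _ hpre
  unfold Spec_mixtures_smoke
  rw [pvA colors hpre, pvB colors hpre]
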